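-- pv_equiv track=rewrite | github.com/jhugobb/a3dm | code/ex6.py | union_find
-- ===== SOURCE A (Python) =====
-- def union_find(collection):
--     collection = map(set, collection)
--     unions = []
--     for el in collection:
--         tmp = []
--         for u in unions:
--             if not u.isdisjoint(el):
--                 el = u.union(el)
--             else:
--                 tmp.append(u)
--         tmp.append(el)
--         unions = tmp
--     return unions
-- ===== SOURCE B (Python) =====
-- def union_find(collection):
--     groups = {}   # group id -> set of elements; ids are assigned in increasing order
--     where = {}    # element -> id of the group currently containing it
--     n = 0
--     for s in collection:
--         el = set(s)
--         hit = []
--         for e in el: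
--             i = where.get(e)
--             if i is not None and i not in hit:
--                 hit.append(i)
--         merged = el
--         for i in sorted(hit):
--             merged = groups.pop(i) | merged
--         groups[n] = merged
--         for e in merged:
--             where[e] = n
--         n += 1
--     return list(groups.values())
-- ===== Notes on version B (the rewrite author's own statement) =====
-- stated objective: faster
-- what changed: Instead of scanning every existing group and testing set-disjointness for each new set, B keeps an element-to-group dictionary and finds the groups to merge by looking up only the new set's own elements, merging the hit groups in id order and tracking output order by increasing group ids.
import Mathlib
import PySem

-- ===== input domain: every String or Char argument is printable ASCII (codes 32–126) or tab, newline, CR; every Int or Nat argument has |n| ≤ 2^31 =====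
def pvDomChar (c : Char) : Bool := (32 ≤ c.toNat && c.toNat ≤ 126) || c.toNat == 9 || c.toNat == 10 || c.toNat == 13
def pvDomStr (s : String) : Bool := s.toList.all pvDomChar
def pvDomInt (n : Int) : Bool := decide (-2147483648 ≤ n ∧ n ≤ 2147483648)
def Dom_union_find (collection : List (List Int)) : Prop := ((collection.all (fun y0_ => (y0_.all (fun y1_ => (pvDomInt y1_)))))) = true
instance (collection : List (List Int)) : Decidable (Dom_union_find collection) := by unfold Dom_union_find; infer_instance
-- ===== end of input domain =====

-- ===== PORT A =====
-- Header: B replaces A's per-set scan over all existing groups with an element->group-id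
-- dictionary (the hinted union-find style merge); objective: faster.
def union_find (collection : List (List Int)) : List (List Int) :=
  (collection.map (fun s => PySem.Set.ofList s)).foldl
    (fun unions el0 =>
      let p := unions.foldl
        (fun (p : List (List Int) × List Int) u =>
          if !(PySem.Set.isdisjoint u p.2) then (p.1, PySem.Set.union u p.2)
          else (p.1 ++ [u], p.2))
        ([], el0)
      p.1 ++ [p.2])
    []

-- ===== PORT B =====
def union_find_alt (collection : List (List Int)) : List (List Int) :=
  (collection.foldl
    (fun (st : PySem.Dict Int (List Int) × PySem.Dict Int Int × Int) s =>
      let groups := st.1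
      let wher := st.2.1
      let n := st.2.2
      let el := PySem.Set.ofList s
      let hit := el.foldl
        (fun (hit : List Int) e =>
          match wher.get? e with
          | some i => if hit.contains i then hit else hit ++ [i]
          | none => hit) []
      let pm := (PySem.List.sorted hit (fun x => x) false).foldl
        (fun (pm : PySem.Dict Int (List Int) × List Int) i =>
          (pm.1.erase i, PySem.Set.union (pm.1.getD i []) pm.2))
        (groups, el)
      (pm.1.insert n pm.2, pm.2.foldl (fun w e => w.insert e n) wher, n + 1))
    (PySem.Dict.empty, PySem.Dict.empty, 0)).1.values

-- ===== PRECONDITION & SPEC =====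
def Spec_union_find (collection : List (List Int)) (out : List (List Int)) : Prop := out = union_find_alt collection
instance (collection : List (List Int)) (out : List (List Int)) : Decidable (Spec_union_find collection out) := by unfold Spec_union_find; infer_instance

-- ===== CLAIM (what is proved, stated in full; the proofs are below) =====
def Claim_equal_union_find : Prop := ∀ (collection : List (List Int)), Dom_union_find collection → Spec_union_find collection (union_find collection)

-- ===== LEMMAS AND PROOFS =====

-- ===== proof helpers =====
def stepA (unions : List (List Int)) (el0 : List Int) : List (List Int) :=
  let p := unions.foldl
    (fun (p : List (List Int) × List Int) u =>
      if !(PySem.Set.isdisjoint u p.2) then (p.1, PySem.Set.union u p.2)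
      else (p.1 ++ [u], p.2))
    ([], el0)
  p.1 ++ [p.2]

def stepB (st : PySem.Dict Int (List Int) × PySem.Dict Int Int × Int) (s : List Int) :
    PySem.Dict Int (List Int) × PySem.Dict Int Int × Int :=
  let groups := st.1
  let wher := st.2.1
  let n := st.2.2
  let el := PySem.Set.ofList s
  let hit := el.foldl
    (fun (hit : List Int) e =>
      match wher.get? e with
      | some i => if hit.contains i then hit else hit ++ [i]
      | none => hit) []
  let pm := (PySem.List.sorted hit (fun x => x) false).foldl
    (fun (pm : PySem.Dict Int (List Int) × List Int) i =>
      (pm.1.erase i, PySem.Set.union (pm.1.getD i []) pm.2))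
    (groups, el)
  (pm.1.insert n pm.2, pm.2.foldl (fun w e => w.insert e n) wher, n + 1)

theorem union_find_eq (c : List (List Int)) :
    union_find c = (c.map (fun s => PySem.Set.ofList s)).foldl stepA [] := rfl

theorem union_find_alt_eq (c : List (List Int)) :
    union_find_alt c = (c.foldl stepB (PySem.Dict.empty, PySem.Dict.empty, 0)).1.values := rfl

def UFInv (unions : List (List Int)) (st : PySem.Dict Int (List Int) × PySem.Dict Int Int × Int) : Prop :=
  st.1.values = unions ∧
  st.1.keys.Pairwise (· < ·) ∧
  (∀ k ∈ st.1.keys, k < st.2.2) ∧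
  (∀ e i, st.2.1.get? e = some i ↔ ∃ g, (i, g) ∈ st.1.items ∧ e ∈ g)

-- get? after a loop of inserts with a constant value
theorem get?_foldl_insert_const (L : List Int) (w : PySem.Dict Int Int) (n e : Int) :
    (L.foldl (fun w x => w.insert x n) w).get? e =
      if e ∈ L then some n else w.get? e := by
  induction L generalizing w with
  | nil => simp
  | cons x L ih =>
    simp only [List.foldl_cons, ih, List.mem_cons]
    by_cases hL : e ∈ L
    · simp [hL]
    · by_cases hx : e = x
      · simp [hx, hL, PySem.Dict.get?_insert_self]
      · simp only [hx, hL, or_self, if_false]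
        exact PySem.Dict.get?_insert_of_ne _ _ hx

theorem get?_erase_of_ne (d : PySem.Dict Int (List Int)) (i j : Int) (h : j ≠ i) :
    (d.erase i).get? j = d.get? j := by
  have hfun : (fun (a : Int × List Int) => decide ((!(a.1 == i)) = true ∧ (a.1 == j) = true))
      = fun (a : Int × List Int) => a.1 == j := by
    funext a
    by_cases ha : a.1 = j
    · simp [ha, h]
    · simp [ha]
  simp only [PySem.Dict.erase, PySem.Dict.get?, List.find?_filter, hfun]

-- membership in a fold of set-unions
theorem mem_foldl_union (gs : List (List Int)) (acc : List Int) (x : Int) :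
    x ∈ gs.foldl (fun m u => PySem.Set.union u m) acc ↔ x ∈ acc ∨ ∃ u ∈ gs, x ∈ u := by
  induction gs generalizing acc with
  | nil => simp
  | cons g gs ih =>
    rw [List.foldl_cons, ih]
    simp only [PySem.Set.mem_union, List.mem_cons]
    constructor
    · rintro (⟨h | h⟩ | ⟨u, hu, hx⟩)
      · exact Or.inr ⟨g, Or.inl rfl, h⟩
      · exact Or.inl h
      · exact Or.inr ⟨u, Or.inr hu, hx⟩
    · rintro (h | ⟨u, (rfl | hu), hx⟩)
      · exact Or.inl (Or.inr h)
      · exact Or.inl (Or.inl hx)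
      · exact Or.inr ⟨u, hu, hx⟩

theorem bool_eq_of_iff {a b : Bool} (h : a = true ↔ b = true) : a = b := by
  cases a <;> cases b <;> simp_all

theorem hit_mem (w : PySem.Dict Int Int) (L : List Int) (h0 : List Int) (i : Int) :
    i ∈ L.foldl (fun (hit : List Int) e =>
        match w.get? e with
        | some i => if hit.contains i then hit else hit ++ [i]
        | none => hit) h0
      ↔ i ∈ h0 ∨ ∃ e ∈ L, w.get? e = some i := by
  induction L generalizing h0 with
  | nil => simp
  | cons e L ih =>
    rw [List.foldl_cons, ih]
    cases hw : w.get? e with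
    | none =>
      rw [show (match (none : Option Int) with
          | some i => if h0.contains i then h0 else h0 ++ [i]
          | none => h0) = h0 from rfl]
      simp only [List.mem_cons]
      constructor
      · rintro (h | ⟨e', he', h⟩)
        · exact Or.inl h
        · exact Or.inr ⟨e', Or.inr he', h⟩
      · rintro (h | ⟨e', (rfl | he'), h⟩)
        · exact Or.inl h
        · rw [hw] at h; cases h
        · exact Or.inr ⟨e', he', h⟩
    | some j =>
      rw [show (match (some j : Option Int) with
          | some i => if h0.contains i then h0 else h0 ++ [i]
          | none => h0) = (if j ∈ h0 then h0 else h0 ++ [j]) by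
        simp]
      simp only [List.mem_cons]
      by_cases hc : j ∈ h0
      · rw [if_pos hc]
        constructor
        · rintro (h | ⟨e', he', h⟩)
          · exact Or.inl h
          · exact Or.inr ⟨e', Or.inr he', h⟩
        · rintro (h | ⟨e', (rfl | he'), h⟩)
          · exact Or.inl h
          · rw [hw] at h; obtain rfl : j = i := by injection h
            exact Or.inl hc
          · exact Or.inr ⟨e', he', h⟩
      · rw [if_neg hc]
        simp only [List.mem_append, List.mem_singleton]
        constructor
        · rintro (⟨h | rfl⟩ | ⟨e', he', h⟩)
          · exact Or.inl h
          · exact Or.inr ⟨e, Or.inl rfl, hw⟩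
          · exact Or.inr ⟨e', Or.inr he', h⟩
        · rintro (h | ⟨e', (rfl | he'), h⟩)
          · exact Or.inl (Or.inl h)
          · rw [hw] at h; obtain rfl : j = i := by injection h
            exact Or.inl (Or.inr rfl)
          · exact Or.inr ⟨e', he', h⟩

theorem hit_nodup (w : PySem.Dict Int Int) (L : List Int) (h0 : List Int) (hn : h0.Nodup) :
    (L.foldl (fun (hit : List Int) e =>
        match w.get? e with
        | some i => if hit.contains i then hit else hit ++ [i]
        | none => hit) h0).Nodup := by
  induction L generalizing h0 with
  | nil => exact hn
  | cons e L ih =>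
    rw [List.foldl_cons]
    cases hw : w.get? e with
    | none =>
      rw [show (match (none : Option Int) with
          | some i => if h0.contains i then h0 else h0 ++ [i]
          | none => h0) = h0 from rfl]
      exact ih h0 hn
    | some j =>
      rw [show (match (some j : Option Int) with
          | some i => if h0.contains i then h0 else h0 ++ [i]
          | none => h0) = (if j ∈ h0 then h0 else h0 ++ [j]) by
        simp]
      by_cases hc : j ∈ h0
      · rw [if_pos hc]; exact ih h0 hn
      · rw [if_neg hc]
        refine ih _ (List.Nodup.append hn (by simp) ?_)
        intro a ha hb
        rw [List.mem_singleton] at hb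
        exact hc (hb ▸ ha)

theorem foldA_eq (us : List (List Int)) (tmp : List (List Int)) (elc el0 : List Int)
    (hpw : us.Pairwise (fun u v => ∀ x ∈ u, x ∉ v))
    (hd : ∀ u ∈ us, PySem.Set.isdisjoint u elc = PySem.Set.isdisjoint u el0) :
    us.foldl (fun (p : List (List Int) × List Int) u =>
        if !(PySem.Set.isdisjoint u p.2) then (p.1, PySem.Set.union u p.2)
        else (p.1 ++ [u], p.2)) (tmp, elc)
      = (tmp ++ us.filter (fun u => PySem.Set.isdisjoint u el0),
         (us.filter (fun u => !(PySem.Set.isdisjoint u el0))).foldl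
           (fun m u => PySem.Set.union u m) elc) := by
  induction us generalizing tmp elc with
  | nil => simp
  | cons u us ih =>
    have hu : PySem.Set.isdisjoint u elc = PySem.Set.isdisjoint u el0 :=
      hd u (List.mem_cons_self)
    rw [List.foldl_cons]
    by_cases hdisj : PySem.Set.isdisjoint u el0 = true
    · rw [show (if !(PySem.Set.isdisjoint u elc) then (tmp, PySem.Set.union u elc)
            else (tmp ++ [u], elc)) = (tmp ++ [u], elc) by simp [hu, hdisj]]
      rw [ih (tmp ++ [u]) elc hpw.of_cons (fun v hv => hd v (List.mem_cons_of_mem _ hv))]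
      simp [List.filter_cons, hdisj]
    · have hdisj' : PySem.Set.isdisjoint u el0 = false := by
        cases h : PySem.Set.isdisjoint u el0 <;> simp_all
      rw [show (if !(PySem.Set.isdisjoint u elc) then (tmp, PySem.Set.union u elc)
            else (tmp ++ [u], elc)) = (tmp, PySem.Set.union u elc) by simp [hu, hdisj']]
      have hd' : ∀ v ∈ us, PySem.Set.isdisjoint v (PySem.Set.union u elc)
          = PySem.Set.isdisjoint v el0 := by
        intro v hv
        have huv : ∀ x ∈ u, x ∉ v := (List.pairwise_cons.mp hpw).1 v hv
        have h1 : PySem.Set.isdisjoint v (PySem.Set.union u elc)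
            = PySem.Set.isdisjoint v elc := by
          apply bool_eq_of_iff
          rw [PySem.Set.isdisjoint_iff, PySem.Set.isdisjoint_iff]
          constructor
          · intro h x hx hxe
            exact h x hx (by rw [PySem.Set.mem_union]; exact Or.inr hxe)
          · intro h x hx hxu
            rw [PySem.Set.mem_union] at hxu
            rcases hxu with hxu | hxe
            · exact huv x hxu hx
            · exact h x hx hxe
        rw [h1]; exact hd v (List.mem_cons_of_mem _ hv)
      rw [ih tmp _ hpw.of_cons hd']
      simp [List.filter_cons, hdisj']

theorem keys_erase (d : PySem.Dict Int (List Int)) (i : Int) :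
    (d.erase i).keys = d.keys.filter (fun j => !(j == i)) := by
  obtain ⟨l⟩ := d
  simp only [PySem.Dict.erase, PySem.Dict.keys, List.filter_map]
  rfl

theorem foldB_eq (ids : List Int) (d : PySem.Dict Int (List Int)) (acc : List Int)
    (hnd : ids.Nodup) (hsub : ∀ i ∈ ids, i ∈ d.keys) (hk : d.keys.Nodup) :
    ids.foldl (fun (pm : PySem.Dict Int (List Int) × List Int) i =>
        (pm.1.erase i, PySem.Set.union (pm.1.getD i []) pm.2)) (d, acc)
      = (PySem.Dict.mk (d.items.filter (fun p => !(ids.contains p.1))),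
         (ids.map (fun i => d.getD i [])).foldl (fun m u => PySem.Set.union u m) acc) := by
  induction ids generalizing d acc with
  | nil =>
    simp only [List.foldl_nil, List.map_nil]
    obtain ⟨l⟩ := d
    congr 1
    simp [List.filter_true]
  | cons i ids ih =>
    rw [List.foldl_cons]
    have hine : ∀ j ∈ ids, j ≠ i := by
      intro j hj rfl
      exact (List.nodup_cons.mp hnd).1 hj
    have hsub' : ∀ j ∈ ids, j ∈ (d.erase i).keys := by
      intro j hj
      rw [keys_erase]
      rw [List.mem_filter]
      exact ⟨hsub j (List.mem_cons_of_mem _ hj), by simpa using hine j hj⟩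
    have hk' : (d.erase i).keys.Nodup := by
      rw [keys_erase]
      exact hk.filter _
    rw [ih (d.erase i) _ (List.nodup_cons.mp hnd).2 hsub' hk']
    rw [Prod.mk.injEq]
    refine ⟨?_, ?_⟩
    · -- dict components
      congr 1
      obtain ⟨l⟩ := d
      simp only [PySem.Dict.erase, List.filter_filter]
      apply List.filter_congr
      intro p _
      simp only [List.contains_cons]
      cases hpi : (p.1 == i) <;> cases hpm : ids.contains p.1 <;> simp [hpi, hpm]
    · -- merge components
      simp only [List.map_cons, List.foldl_cons]
      congr 1
      · apply List.map_congr_left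
        intro j hj
        simp only [PySem.Dict.getD]
        rw [get?_erase_of_ne d i j (hine j hj)]

theorem map_getD_eq_filter (l : List (Int × List Int)) (ids : List Int)
    (hkeys : (l.map Prod.fst).Pairwise (· < ·))
    (hids : ids.Pairwise (· < ·))
    (hsub : ∀ i ∈ ids, i ∈ l.map Prod.fst) :
    ids.map (fun i => (PySem.Dict.mk l).getD i [])
      = (l.filter (fun p => ids.contains p.1)).map Prod.snd := by
  induction l generalizing ids with
  | nil =>
    cases ids with
    | nil => simp
    | cons a t => exact absurd (hsub a List.mem_cons_self) (by simp)
  | cons p l ih =>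
    obtain ⟨k, g⟩ := p
    simp only [List.map_cons] at hkeys
    have hkl : ∀ j ∈ l.map Prod.fst, k < j := (List.pairwise_cons.mp hkeys).1
    by_cases hmem : k ∈ ids
    · cases ids with
      | nil => cases hmem
      | cons a t =>
        have hak : a = k := by
          rcases List.mem_cons.mp (hsub a List.mem_cons_self) with h | h
          · exact h
          · rcases List.mem_cons.mp hmem with h' | h'
            · exact h'.symm
            · have := (List.pairwise_cons.mp hids).1 k h'
              have := hkl a h
              omega
        subst hak
        have htlt : ∀ j ∈ t, a < j := (List.pairwise_cons.mp hids).1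
        have htsub : ∀ j ∈ t, j ∈ l.map Prod.fst := by
          intro j hj
          rcases List.mem_cons.mp (hsub j (List.mem_cons_of_mem _ hj)) with h | h
          · exact absurd h (by have := htlt j hj; omega)
          · exact h
        have hhead : (PySem.Dict.mk ((a, g) :: l)).getD a [] = g := by
          simp [PySem.Dict.getD, PySem.Dict.get?_mk_cons]
        have htail : ∀ j ∈ t, (PySem.Dict.mk ((a, g) :: l)).getD j []
            = (PySem.Dict.mk l).getD j [] := by
          intro j hj
          have : ¬ (a == j) = true := by simp; have := htlt j hj; omega
          simp [PySem.Dict.getD, PySem.Dict.get?_mk_cons, this]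
        rw [List.map_cons, hhead, List.map_congr_left htail,
          ih t ((List.pairwise_cons.mp hkeys).2) ((List.pairwise_cons.mp hids).2) htsub]
        rw [List.filter_cons]
        have : ((a :: t).contains (a, g).1) = true := by simp
        rw [this, if_pos rfl, List.map_cons]
        congr 1
        apply congrArg
        apply List.filter_congr
        intro q hq
        have hq1 : a < q.1 := hkl q.1 (List.mem_map_of_mem hq)
        simp only [List.contains_cons]
        have : ¬ (q.1 == a) = true := by simp; omega
        simp [this]
    · have htsub : ∀ j ∈ ids, j ∈ l.map Prod.fst := by
        intro j hj
        rcases List.mem_cons.mp (hsub j hj) with h | h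
        · exact absurd h (fun h' => hmem (by simp only [] at h'; exact h' ▸ hj))
        · exact h
      have htail : ∀ j ∈ ids, (PySem.Dict.mk ((k, g) :: l)).getD j []
          = (PySem.Dict.mk l).getD j [] := by
        intro j hj
        have : ¬ (k == j) = true := by
          simp
          intro h
          exact hmem (h ▸ hj)
        simp [PySem.Dict.getD, PySem.Dict.get?_mk_cons, this]
      rw [List.map_congr_left htail, ih ids ((List.pairwise_cons.mp hkeys).2) hids htsub, List.filter_cons]
      have : ((ids).contains (k, g).1) = false := by
        simp only [List.contains_eq_mem]
        simpa using hmem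
      rw [this]
      simp

theorem step_inv (unions : List (List Int)) (d : PySem.Dict Int (List Int))
    (w : PySem.Dict Int Int) (n : Int) (s : List Int)
    (h : UFInv unions (d, w, n)) :
    UFInv (stepA unions (PySem.Set.ofList s)) (stepB (d, w, n) s) := by
  obtain ⟨hv, hkp, hlt, hw⟩ := h
  simp only at hv hkp hlt hw
  -- abbreviations
  set el := PySem.Set.ofList s with hel
  have hknd : d.keys.Nodup := hkp.imp (fun h => ne_of_lt h)
  have hkeys_def : d.keys = d.items.map Prod.fst := rfl
  have hitems_pw : d.items.Pairwise (fun p q => p.1 < q.1) := by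
    rw [hkeys_def] at hkp
    exact List.pairwise_map.mp hkp
  have hdisj_items : d.items.Pairwise (fun p q => ∀ x ∈ p.2, x ∉ q.2) := by
    refine hitems_pw.imp_of_mem ?_
    intro p q hp hq hlt' x hxp hxq
    have h1 : w.get? x = some p.1 := (hw x p.1).mpr ⟨p.2, by simpa using hp, hxp⟩
    have h2 : w.get? x = some q.1 := (hw x q.1).mpr ⟨q.2, by simpa using hq, hxq⟩
    rw [h1] at h2
    injection h2 with h2
    omega
  have hupw : unions.Pairwise (fun u v => ∀ x ∈ u, x ∉ v) := by
    rw [← hv]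
    exact List.pairwise_map.mpr hdisj_items
  -- the hit list
  set hitL := el.foldl (fun (hit : List Int) e =>
      match w.get? e with
      | some i => if hit.contains i then hit else hit ++ [i]
      | none => hit) [] with hhitL
  have hmemhit : ∀ i, i ∈ hitL ↔ ∃ e ∈ el, w.get? e = some i := by
    intro i
    rw [hhitL, hit_mem]
    simp
  have hhitnd : hitL.Nodup := hit_nodup w el [] (by simp)
  set hitS := PySem.List.sorted hitL (fun x => x) false with hhitS
  have hS_mem : ∀ i, i ∈ hitS ↔ i ∈ hitL := fun i => PySem.List.mem_sorted hitL _ false i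
  have hS_nd : hitS.Nodup := (PySem.List.sorted_perm hitL (fun x => x) false).nodup_iff.mpr hhitnd
  have hS_pw : hitS.Pairwise (· < ·) := by
    have hle : hitS.Pairwise (fun a b => a ≤ b) := PySem.List.sorted_pairwise hitL (fun x => x)
    exact (hle.and hS_nd).imp (fun h => lt_of_le_of_ne h.1 h.2)
  have hS_sub : ∀ i ∈ hitS, i ∈ d.keys := by
    intro i hi
    obtain ⟨e, _, hge⟩ := (hmemhit i).mp ((hS_mem i).mp hi)
    obtain ⟨g, hg, _⟩ := (hw e i).mp hge
    rw [hkeys_def]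
    exact List.mem_map_of_mem hg
  -- per-item: being hit = not disjoint from el
  have hitem_hit : ∀ p ∈ d.items, (hitS.contains p.1 = !(PySem.Set.isdisjoint p.2 el)) := by
    intro p hp
    have hiff1 : (hitS.contains p.1 = true) ↔ ∃ e ∈ el, w.get? e = some p.1 := by
      rw [List.contains_eq_mem, decide_eq_true_iff, hS_mem, hmemhit]
    have hiff2 : ((!(PySem.Set.isdisjoint p.2 el)) = true) ↔ ∃ x ∈ p.2, x ∈ el := by
      cases hb : PySem.Set.isdisjoint p.2 el
      · have hne := mt (PySem.Set.isdisjoint_iff p.2 el).mpr (by simp [hb])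
        push_neg at hne
        simpa using hne
      · have hall := (PySem.Set.isdisjoint_iff p.2 el).mp hb
        simp only [Bool.not_true]
        constructor
        · intro h; cases h
        · rintro ⟨x, hx, hxe⟩; exact absurd hxe (hall x hx)
    have hswap : (∃ e ∈ el, w.get? e = some p.1) ↔ ∃ x ∈ p.2, x ∈ el := by
      constructor
      · rintro ⟨e, hee, hge⟩
        obtain ⟨g, hg, heg⟩ := (hw e p.1).mp hge
        have hgp : g = p.2 := by
          have h1 := PySem.Dict.get?_of_mem_items d hg hknd
          have h2 := PySem.Dict.get?_of_mem_items d
            (show (p.1, p.2) ∈ d.items by simpa using hp) hknd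
          rw [h1] at h2
          exact Option.some.inj h2
        exact ⟨e, hgp ▸ heg, hee⟩
      · rintro ⟨x, hxp, hxe⟩
        exact ⟨x, hxe, (hw x p.1).mpr ⟨p.2, by simpa using hp, hxp⟩⟩
    exact bool_eq_of_iff ((hiff1.trans hswap).trans hiff2.symm)
  -- B's inner fold
  have hfoldB := foldB_eq hitS d el hS_nd hS_sub hknd
  -- the merged group lists coincide
  have hmapfst : (d.items.map Prod.fst).Pairwise (· < ·) := by rw [← hkeys_def]; exact hkp
  have hmk : PySem.Dict.mk d.items = d := by obtain ⟨l⟩ := d; rfl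
  have hgetD : hitS.map (fun i => d.getD i []) =
      (d.items.filter (fun p => hitS.contains p.1)).map Prod.snd := by
    have := map_getD_eq_filter d.items hitS hmapfst hS_pw
      (by intro i hi; rw [← hkeys_def]; exact hS_sub i hi)
    rwa [hmk] at this
  have hfilter_hit : d.items.filter (fun p => hitS.contains p.1)
      = d.items.filter (fun p => !(PySem.Set.isdisjoint p.2 el)) :=
    List.filter_congr hitem_hit
  have hfilter_miss : d.items.filter (fun p => !(hitS.contains p.1))
      = d.items.filter (fun p => PySem.Set.isdisjoint p.2 el) := by
    apply List.filter_congr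
    intro p hp
    rw [hitem_hit p hp, Bool.not_not]
  have hval_hit : (d.items.filter (fun p => hitS.contains p.1)).map Prod.snd
      = unions.filter (fun u => !(PySem.Set.isdisjoint u el)) := by
    rw [hfilter_hit, ← hv]
    show _ = (d.items.map (fun x => x.2)).filter _
    rw [List.filter_map]
    rfl
  have hval_miss : (d.items.filter (fun p => !(hitS.contains p.1))).map Prod.snd
      = unions.filter (fun u => PySem.Set.isdisjoint u el) := by
    rw [hfilter_miss, ← hv]
    show _ = (d.items.map (fun x => x.2)).filter _
    rw [List.filter_map]
    rfl
  -- compute both steps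
  set merged := (hitS.map (fun i => d.getD i [])).foldl (fun m u => PySem.Set.union u m) el
    with hmerged
  have hmerged_eq : merged
      = (unions.filter (fun u => !(PySem.Set.isdisjoint u el))).foldl
          (fun m u => PySem.Set.union u m) el := by
    rw [hmerged, hgetD, hval_hit]
  have hA : stepA unions el
      = unions.filter (fun u => PySem.Set.isdisjoint u el) ++ [merged] := by
    have h0 : stepA unions el = (unions.foldl
        (fun (p : List (List Int) × List Int) u =>
          if !(PySem.Set.isdisjoint u p.2) then (p.1, PySem.Set.union u p.2)
          else (p.1 ++ [u], p.2)) ([], el)).1 ++ [(unions.foldl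
        (fun (p : List (List Int) × List Int) u =>
          if !(PySem.Set.isdisjoint u p.2) then (p.1, PySem.Set.union u p.2)
          else (p.1 ++ [u], p.2)) ([], el)).2] := rfl
    rw [h0, foldA_eq unions [] el el hupw (fun _ _ => rfl), hmerged_eq]
    simp
  set dd := PySem.Dict.mk (d.items.filter (fun p => !(hitS.contains p.1))) with hdd
  have hB : stepB (d, w, n) s
      = (dd.insert n merged, merged.foldl (fun w e => w.insert e n) w, n + 1) := by
    have h0 : stepB (d, w, n) s
        = ((hitS.foldl (fun (pm : PySem.Dict Int (List Int) × List Int) i =>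
              (pm.1.erase i, PySem.Set.union (pm.1.getD i []) pm.2)) (d, el)).1.insert n
            (hitS.foldl (fun (pm : PySem.Dict Int (List Int) × List Int) i =>
              (pm.1.erase i, PySem.Set.union (pm.1.getD i []) pm.2)) (d, el)).2,
           (hitS.foldl (fun (pm : PySem.Dict Int (List Int) × List Int) i =>
              (pm.1.erase i, PySem.Set.union (pm.1.getD i []) pm.2)) (d, el)).2.foldl
             (fun w e => w.insert e n) w, n + 1) := rfl
    rw [h0, hfoldB]
  have hddkeys : dd.keys = (d.items.filter (fun p => !(hitS.contains p.1))).map Prod.fst := rfl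
  have hddsub : ∀ k ∈ dd.keys, k ∈ d.keys := by
    intro k hk
    rw [hddkeys] at hk
    obtain ⟨p, hp, rfl⟩ := List.mem_map.mp hk
    rw [hkeys_def]
    exact List.mem_map_of_mem (List.mem_of_mem_filter hp)
  have hnotin : dd.contains n = false := by
    rw [Bool.eq_false_iff]
    intro hc
    have := hlt n (hddsub n ((PySem.Dict.contains_iff_mem_keys dd n).mp hc))
    omega
  have hitems' : (dd.insert n merged).items = dd.items ++ [(n, merged)] :=
    PySem.Dict.items_insert_of_not_contains dd merged hnotin
  have hdditems : dd.items = d.items.filter (fun p => !(hitS.contains p.1)) := rfl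
  have hmerged_mem : ∀ x, x ∈ merged ↔ x ∈ el ∨ ∃ p ∈ d.items, p.1 ∈ hitS ∧ x ∈ p.2 := by
    intro x
    rw [hmerged, mem_foldl_union]
    constructor
    · rintro (hx | ⟨u, hu, hxu⟩)
      · exact Or.inl hx
      · rw [hgetD] at hu
        obtain ⟨p, hp, rfl⟩ := List.mem_map.mp hu
        rw [List.mem_filter] at hp
        exact Or.inr ⟨p, hp.1, by simpa using hp.2, hxu⟩
    · rintro (hx | ⟨p, hp, hp1, hxp⟩)
      · exact Or.inl hx
      · refine Or.inr ⟨p.2, ?_, hxp⟩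
        rw [hgetD]
        exact List.mem_map_of_mem (List.mem_filter.mpr ⟨hp, by simpa using hp1⟩)
  rw [hA, hB]
  refine ⟨?_, ?_, ?_, ?_⟩
  · -- values
    show (dd.insert n merged).values = _
    show (dd.insert n merged).items.map (fun x => x.2) = _
    rw [hitems', hdditems]
    rw [List.map_append]
    congr 1
  · -- keys sorted
    show (dd.insert n merged).keys.Pairwise (· < ·)
    show ((dd.insert n merged).items.map (fun x => x.1)).Pairwise (· < ·)
    rw [hitems', List.map_append]
    rw [List.pairwise_append]
    refine ⟨?_, by simp, ?_⟩
    · have hsubl : (dd.items.map (fun x => x.1)).Sublist (d.items.map (fun x => x.1)) := by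
        exact List.Sublist.map _ (List.filter_sublist)
      exact hkp.sublist hsubl
    · intro a ha b hb
      rw [List.mem_map] at ha
      obtain ⟨p, hp, rfl⟩ := ha
      simp only [List.map_cons, List.map_nil, List.mem_singleton] at hb
      subst hb
      exact hlt p.1 (hddsub p.1 (List.mem_map_of_mem hp))
  · -- keys bounded
    intro k hk
    show k < n + 1
    have : (dd.insert n merged).keys = dd.items.map (fun x => x.1) ++ [n] := by
      show (dd.insert n merged).items.map (fun x => x.1) = _
      rw [hitems', List.map_append]
      rfl
    rw [this, List.mem_append] at hk
    rcases hk with hk | hk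
    · have := hlt k (hddsub k hk)
      omega
    · simp only [List.mem_singleton] at hk
      omega
  · -- lookup invariant
    intro e i
    show (merged.foldl (fun w e => w.insert e n) w).get? e = some i ↔ _
    rw [get?_foldl_insert_const]
    by_cases he : e ∈ merged
    · rw [if_pos he]
      constructor
      · intro hi
        obtain rfl : n = i := by injection hi
        exact ⟨merged, by rw [hitems']; exact List.mem_append_right _ (by simp), he⟩
      · rintro ⟨g, hg, heg⟩
        rw [hitems'] at hg
        rcases List.mem_append.mp hg with hg | hg
        · exfalso
          rw [hdditems, List.mem_filter] at hg
          have hiS : i ∉ hitS := by simpa using hg.2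
          rcases (hmerged_mem e).mp he with hx | ⟨p, hp, hp1, hep⟩
          · have : w.get? e = some i := (hw e i).mpr ⟨g, hg.1, heg⟩
            exact hiS ((hS_mem i).mpr ((hmemhit i).mpr ⟨e, hx, this⟩))
          · have h1 : w.get? e = some i := (hw e i).mpr ⟨g, hg.1, heg⟩
            have h2 : w.get? e = some p.1 := (hw e p.1).mpr ⟨p.2, by simpa using hp, hep⟩
            rw [h1] at h2
            obtain rfl : i = p.1 := by injection h2
            exact hiS hp1
        · simp only [List.mem_singleton] at hg
          obtain ⟨h1, h2⟩ : i = n ∧ g = merged := by simpa [Prod.ext_iff] using hg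
          rw [h1]
    · rw [if_neg he, hw e i]
      constructor
      · rintro ⟨g, hg, heg⟩
        refine ⟨g, ?_, heg⟩
        rw [hitems']
        refine List.mem_append_left _ ?_
        rw [hdditems, List.mem_filter]
        refine ⟨hg, ?_⟩
        simp only [Bool.not_eq_true', ← Bool.not_eq_true]
        intro hiS
        have hiS' : i ∈ hitS := by simpa using hiS
        exact he ((hmerged_mem e).mpr (Or.inr ⟨(i, g), hg, hiS', heg⟩))
      · rintro ⟨g, hg, heg⟩
        rw [hitems'] at hg
        rcases List.mem_append.mp hg with hg | hg
        · exact ⟨g, List.mem_of_mem_filter (hdditems ▸ hg), heg⟩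
        · exfalso
          simp only [List.mem_singleton] at hg
          obtain ⟨h1, h2⟩ : i = n ∧ g = merged := by simpa [Prod.ext_iff] using hg
          exact he (h2 ▸ heg)

theorem main_fold (coll : List (List Int)) :
    ∀ (unions : List (List Int)) (st : PySem.Dict Int (List Int) × PySem.Dict Int Int × Int),
    UFInv unions st →
    (coll.foldl stepB st).1.values = (coll.map (fun s => PySem.Set.ofList s)).foldl stepA unions := by
  induction coll with
  | nil =>
    intro unions st h
    exact h.1
  | cons s coll ih =>
    intro unions st h
    obtain ⟨d, w, n⟩ := st
    rw [List.foldl_cons, List.map_cons, List.foldl_cons]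
    exact ih _ _ (step_inv unions d w n s h)

theorem init_inv : UFInv [] (PySem.Dict.empty, PySem.Dict.empty, (0 : Int)) := by
  refine ⟨rfl, ?_, ?_, ?_⟩
  · simp [PySem.Dict.empty, PySem.Dict.keys]
  · intro k hk
    simp [PySem.Dict.empty, PySem.Dict.keys] at hk
  · intro e i
    simp [PySem.Dict.empty, PySem.Dict.get?]

theorem final (collection : List (List Int)) : union_find collection = union_find_alt collection := by
  rw [union_find_eq, union_find_alt_eq]
  exact (main_fold collection [] _ init_inv).symm

-- ===== VERDICT (by name: the statement is the Claim_ definition above) =====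
theorem union_find_spec : Claim_equal_union_find := by
  intro collection _
  exact final collection
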